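-- pv_equiv track=rewrite | github.com/DarkKsi/Wstep_do_programowania_Serhii_Andrukhiv_73075 | T1_Andrukhiv_Serhii_73075/park.py | najbardziej_dochodowy_dzien
-- ===== SOURCE A (Python) =====
-- def najbardziej_dochodowy_dzien(zwiedzajacy, ceny_biletow):
--     # Analizuje najbardziej dochodowy dzień tygodnia
--     # Zwraca nazwę dnia oraz wartość przychodu
--
--     dni_tygodnia = [
--         "poniedziałek", "wtorek", "środa",
--         "czwartek", "piątek", "sobota", "niedziela"
--     ]
--
--     przychody = []
--
--     for i in range(len(zwiedzajacy)): #oblicza przychód dla każdego dnia tygodnia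
--         przychod_dnia = zwiedzajacy[i] * ceny_biletow[i]
--         przychody.append(przychod_dnia)
--
--     max_przychod = max(przychody)
--     index_dnia = przychody.index(max_przychod)
--
--     return dni_tygodnia[index_dnia], max_przychod
-- ===== SOURCE B (Python) =====
-- def najbardziej_dochodowy_dzien(zwiedzajacy, ceny_biletow):
--     # Single fused pass: track the running best revenue and its day index,
--     # instead of building a revenue list and scanning it twice (max + index).
--     dni_tygodnia = [
--         "poniedziałek", "wtorek", "środa",
--         "czwartek", "piątek", "sobota", "niedziela"
--     ]
--     best = None
--     best_idx = -1
--     for i in range(len(zwiedzajacy)):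
--         p = zwiedzajacy[i] * ceny_biletow[i]
--         if best is None or p > best:
--             best = p
--             best_idx = i
--     if best is None:
--         raise ValueError("max() arg is an empty sequence")
--     return dni_tygodnia[best_idx], best
-- ===== Notes on version B (the rewrite author's own statement) =====
-- stated objective: alternative
-- what changed: Replaces A's three passes (build the revenue list, max() over it, list.index() to find the day) by one fused loop that tracks the running best revenue and its index with a strict comparison, building no intermediate list.
import Mathlib
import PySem

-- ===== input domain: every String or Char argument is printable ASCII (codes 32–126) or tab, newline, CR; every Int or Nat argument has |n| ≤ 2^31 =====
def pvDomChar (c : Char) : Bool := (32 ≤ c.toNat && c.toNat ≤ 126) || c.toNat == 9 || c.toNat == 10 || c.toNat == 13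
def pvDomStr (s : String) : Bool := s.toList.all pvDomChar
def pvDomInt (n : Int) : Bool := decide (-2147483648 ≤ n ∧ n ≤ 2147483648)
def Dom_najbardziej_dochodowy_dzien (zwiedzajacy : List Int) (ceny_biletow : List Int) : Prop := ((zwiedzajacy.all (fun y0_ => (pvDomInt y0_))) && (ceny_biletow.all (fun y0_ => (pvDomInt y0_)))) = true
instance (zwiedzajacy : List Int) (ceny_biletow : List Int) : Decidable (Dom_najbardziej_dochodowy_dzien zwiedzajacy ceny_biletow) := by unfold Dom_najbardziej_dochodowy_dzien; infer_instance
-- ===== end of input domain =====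

-- B fuses A's three passes (build revenue list, max(), .index()) into one loop tracking
-- the running best revenue and its index; same return value on all non-raising inputs.

-- ===== PORT A =====
def najbardziej_dochodowy_dzien (zwiedzajacy : List Int) (ceny_biletow : List Int) : String × Int :=
  let dni_tygodnia : List String :=
    ["poniedziałek", "wtorek", "środa", "czwartek", "piątek", "sobota", "niedziela"]
  let przychody := (PySem.List.pyRange 0 (zwiedzajacy.length : Int) 1).foldl
    (fun acc i => acc ++ [PySem.List.pyGetD zwiedzajacy i 0 * PySem.List.pyGetD ceny_biletow i 0]) []
  let max_przychod := (PySem.List.max? przychody (fun y => y)).getD 0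
  let index_dnia := (PySem.List.index? przychody max_przychod).getD 0
  (PySem.List.pyGetD dni_tygodnia (index_dnia : Int) "", max_przychod)

-- ===== PORT B =====
def najbardziej_dochodowy_dzien_alt (zwiedzajacy : List Int) (ceny_biletow : List Int) : String × Int :=
  let dni_tygodnia : List String :=
    ["poniedziałek", "wtorek", "środa", "czwartek", "piątek", "sobota", "niedziela"]
  let st := (PySem.List.pyRange 0 (zwiedzajacy.length : Int) 1).foldl
    (fun (st : Option Int × Int) i =>
      let p := PySem.List.pyGetD zwiedzajacy i 0 * PySem.List.pyGetD ceny_biletow i 0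
      match st.1 with
      | none => (some p, i)
      | some b => if p > b then (some p, i) else st)
    (none, -1)
  match st.1 with
  | none => ("", 0)   -- Source B raises ValueError here; excluded by Pre_
  | some b => (PySem.List.pyGetD dni_tygodnia st.2 "", b)

-- ===== PRECONDITION & SPEC =====
-- Pre_ excludes exactly the inputs on which Python A raises: the empty list (ValueError from
-- max([])), more than 7 entries (IndexError on dni_tygodnia), and a price list shorter than
-- the visitor list (IndexError on ceny_biletow[i]).
def Pre_najbardziej_dochodowy_dzien (zwiedzajacy : List Int) (ceny_biletow : List Int) : Prop :=
  zwiedzajacy ≠ [] ∧ zwiedzajacy.length ≤ 7 ∧ zwiedzajacy.length ≤ ceny_biletow.length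
instance (zwiedzajacy : List Int) (ceny_biletow : List Int) : Decidable (Pre_najbardziej_dochodowy_dzien zwiedzajacy ceny_biletow) := by unfold Pre_najbardziej_dochodowy_dzien; infer_instance

def pvWitness_najbardziej_dochodowy_dzien : List Int × List Int := ([10, 20, 5], [3, 2, 4])

def Spec_najbardziej_dochodowy_dzien (zwiedzajacy : List Int) (ceny_biletow : List Int) (out : String × Int) : Prop := out = najbardziej_dochodowy_dzien_alt zwiedzajacy ceny_biletow
instance (zwiedzajacy : List Int) (ceny_biletow : List Int) (out : String × Int) : Decidable (Spec_najbardziej_dochodowy_dzien zwiedzajacy ceny_biletow out) := by unfold Spec_najbardziej_dochodowy_dzien; infer_instance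

-- ===== CLAIM (what is proved, stated in full; the proofs are below) =====
def Claim_equal_najbardziej_dochodowy_dzien : Prop := ∀ (zwiedzajacy : List Int) (ceny_biletow : List Int), Dom_najbardziej_dochodowy_dzien zwiedzajacy ceny_biletow → Pre_najbardziej_dochodowy_dzien zwiedzajacy ceny_biletow → Spec_najbardziej_dochodowy_dzien zwiedzajacy ceny_biletow (najbardziej_dochodowy_dzien zwiedzajacy ceny_biletow)

-- ===== LEMMAS AND PROOFS =====

-- the revenue of day index i, shared by both sides of the proof
def pvF (z c : List Int) (i : Int) : Int :=
  PySem.List.pyGetD z i 0 * PySem.List.pyGetD c i 0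

theorem pvF_def (z c : List Int) (i : Int) :
    PySem.List.pyGetD z i 0 * PySem.List.pyGetD c i 0 = pvF z c i := rfl

-- B's loop body as a step function on (value, index) pairs.
def pvStep (st : Option Int × Int) (e : Int × Int) : Option Int × Int :=
  match st.1 with
  | none => (some e.1, e.2)
  | some b => if e.1 > b then (some e.1, e.2) else st

-- index paired with the first occurrence of value m in E (default d).
def pvSndFirst : List (Int × Int) → Int → Int → Int
  | [], _, d => d
  | e :: E, m, d => if e.1 = m then e.2 else pvSndFirst E m d

theorem pvSndFirst_irrel (E : List (Int × Int)) (m d d' : Int)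
    (h : m ∈ E.map Prod.fst) : pvSndFirst E m d = pvSndFirst E m d' := by
  induction E with
  | nil => simp at h
  | cons e E ih =>
    by_cases he : e.1 = m
    · simp [pvSndFirst, he]
    · rw [List.map_cons] at h
      rcases List.mem_cons.mp h with h0 | h0
    
      · exact absurd h0.symm he
      · simp [pvSndFirst, he, ih h0]

theorem pvK0 (E : List (Int × Int)) (b bi : Int) :
    E.foldl pvStep (some b, bi) =
      (some ((E.map Prod.fst).foldl max b),
       if b < (E.map Prod.fst).foldl max b
       then pvSndFirst E ((E.map Prod.fst).foldl max b) bi else bi) := by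
  induction E generalizing b bi with
  | nil => simp
  | cons e E ih =>
    rw [List.foldl_cons]
    by_cases hgt : e.1 > b
    · have hstep : pvStep (some b, bi) e = (some e.1, e.2) := by simp [pvStep, hgt]
      rw [hstep, ih]
      have hmax : max b e.1 = e.1 := max_eq_right (le_of_lt hgt)
      have heM : e.1 ≤ (E.map Prod.fst).foldl max e.1 := (PySem.List.le_foldl_max _ _).1
      have hbM : b < (E.map Prod.fst).foldl max e.1 := lt_of_lt_of_le hgt heM
      simp only [List.map_cons, List.foldl_cons, hmax, if_pos hbM, pvSndFirst]
      by_cases heq : e.1 = (E.map Prod.fst).foldl max e.1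
      · rw [if_neg (by omega : ¬ e.1 < (E.map Prod.fst).foldl max e.1), if_pos heq]
      · have hlt : e.1 < (E.map Prod.fst).foldl max e.1 := lt_of_le_of_ne heM heq
        rw [if_pos hlt, if_neg heq]
        have hmem : (E.map Prod.fst).foldl max e.1 ∈ E.map Prod.fst := by
          rcases PySem.List.foldl_max_mem (E.map Prod.fst) e.1 with h | h
          · exact absurd h.symm heq
          · exact h
        rw [pvSndFirst_irrel E _ e.2 bi hmem]
    · have hstep : pvStep (some b, bi) e = (some b, bi) := by simp [pvStep, hgt]
      rw [hstep, ih]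
      have hle : e.1 ≤ b := not_lt.mp hgt
      have hmax : max b e.1 = b := max_eq_left hle
      simp only [List.map_cons, List.foldl_cons, hmax, pvSndFirst]
      by_cases hbM : b < (E.map Prod.fst).foldl max b
      · have hne : ¬ e.1 = (E.map Prod.fst).foldl max b := by omega
        rw [if_pos hbM, if_pos hbM, if_neg hne]
      · rw [if_neg hbM, if_neg hbM]

theorem pvK1 (L : List Int) (f : Int → Int) (m d : Int) :
    pvSndFirst (L.map (fun i => (f i, i))) m d =
      (PySem.List.index? (L.map f) m).elim d (fun k => L.getD k 0) := by
  induction L with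
  | nil => simp [pvSndFirst, PySem.List.index?_eq_idxOf?]
  | cons i L ih =>
    rw [List.map_cons, List.map_cons]
    by_cases he : f i = m
    · have h0 : PySem.List.index? (f i :: L.map f) m = some 0 := by
        rw [he]; exact PySem.List.index?_cons_self m (L.map f)
      rw [h0]
      simp [pvSndFirst, he]
    · rw [PySem.List.index?_cons_of_ne (L.map f) he]
      have hstep : pvSndFirst ((f i, i) :: L.map (fun i => (f i, i))) m d
          = pvSndFirst (L.map (fun i => (f i, i))) m d := by
        simp [pvSndFirst, he]
      rw [hstep, ih]
      cases PySem.List.index? (L.map f) m with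
      | none => rfl
      | some k => simp

-- ===== VERDICT (by name: the statement is the Claim_ definition above) =====
theorem najbardziej_dochodowy_dzien_spec : Claim_equal_najbardziej_dochodowy_dzien := by
  intro z c _dom pre
  obtain ⟨hne, -, -⟩ := pre
  unfold Spec_najbardziej_dochodowy_dzien
  have hn : (0 : Int) < (z.length : Int) := by
    cases z with
    | nil => exact absurd rfl hne
    | cons a as => simp
  have hrange : PySem.List.pyRange 0 (z.length : Int) 1
      = 0 :: PySem.List.pyRange 1 (z.length : Int) 1 := by
    simpa using PySem.List.pyRange_one_cons (a := 0) (b := (z.length : Int)) hn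
  -- abbreviations (plain terms, re-stated explicitly where needed)
  have hmapfst : ((PySem.List.pyRange 1 (z.length : Int) 1).map
        (fun i => (pvF z c i, i))).map Prod.fst
      = (PySem.List.pyRange 1 (z.length : Int) 1).map (pvF z c) := by
    rw [List.map_map]; rfl
  -- names for the running max and B's final index expression
  set P' : List Int := (PySem.List.pyRange 1 (z.length : Int) 1).map (pvF z c) with hP'
  set m : Int := P'.foldl max (pvF z c 0) with hm
  set R : Int := if pvF z c 0 < m
      then pvSndFirst ((PySem.List.pyRange 1 (z.length : Int) 1).map
        (fun i => (pvF z c i, i))) m 0 else 0 with hR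
  -- evaluate port A
  have eqA : najbardziej_dochodowy_dzien z c
      = (PySem.List.pyGetD
          ["poniedziałek", "wtorek", "środa", "czwartek", "piątek", "sobota", "niedziela"]
          (((PySem.List.index? (pvF z c 0 :: P') m).getD 0 : Nat) : Int) "", m) := by
    simp only [najbardziej_dochodowy_dzien, pvF_def]
    rw [PySem.List.foldl_append_singleton_eq_map, List.nil_append, hrange, List.map_cons,
      PySem.List.max?_id_cons, Option.getD_some, ← hP', ← hm]
  -- evaluate port B
  have hBfold : ∀ (Rl : List Int) (s : Option Int × Int),
      Rl.foldl (fun (st : Option Int × Int) i =>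
        match st.1 with
        | none => (some (pvF z c i), i)
        | some b => if pvF z c i > b then (some (pvF z c i), i) else st) s
      = (Rl.map (fun i => (pvF z c i, i))).foldl pvStep s := by
    intro Rl s
    rw [List.foldl_map]
    rfl
  have eqB : najbardziej_dochodowy_dzien_alt z c
      = (PySem.List.pyGetD
          ["poniedziałek", "wtorek", "środa", "czwartek", "piątek", "sobota", "niedziela"]
          R "", m) := by
    have hstep0 : pvStep (none, -1) (pvF z c 0, 0) = (some (pvF z c 0), 0) := rfl
    simp only [najbardziej_dochodowy_dzien_alt, pvF_def]
    rw [hBfold, hrange, List.map_cons, List.foldl_cons]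
    rw [hstep0, pvK0, hmapfst, ← hm, ← hR]
  -- the two index computations agree
  have hf0m : pvF z c 0 ≤ m := by rw [hm]; exact (PySem.List.le_foldl_max P' (pvF z c 0)).1
  have hidx : (((PySem.List.index? (pvF z c 0 :: P') m).getD 0 : Nat) : Int) = R := by
    by_cases hlt : pvF z c 0 < m
    · have he : pvF z c 0 ≠ m := ne_of_lt hlt
      have hmem : m ∈ P' := by
        rw [hm]
        rcases PySem.List.foldl_max_mem P' (pvF z c 0) with h | h
        · exact absurd h.symm he
        · exact h
      obtain ⟨k, hk⟩ := Option.isSome_iff_exists.mp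
        ((PySem.List.index?_isSome_iff (xs := P') (v := m)).mpr hmem)
      have hklt : k < P'.length := by
        obtain ⟨hklt, -, -⟩ := PySem.List.getElem_of_index?_eq_some hk
        exact hklt
      have hkL : k < (PySem.List.pyRange 1 (z.length : Int) 1).length := by
        simpa [hP'] using hklt
      have hLval : (PySem.List.pyRange 1 (z.length : Int) 1).getD k 0 = 1 + (k : Int) := by
        rw [List.getD_eq_getElem _ _ hkL]
        exact PySem.List.getElem_pyRange_one 1 (z.length : Int) k hkL
      rw [hR, if_pos hlt, pvK1 (PySem.List.pyRange 1 (z.length : Int) 1) (pvF z c) m 0,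
        PySem.List.index?_cons_of_ne P' he]
      rw [hP'] at hk
      rw [hk, Option.map_some, Option.getD_some, Option.elim_some, hLval]
      push_cast
      omega
    · have he : pvF z c 0 = m := le_antisymm hf0m (not_lt.mp hlt)
      rw [hR, if_neg hlt]
      conv_lhs => rw [← he]
      rw [PySem.List.index?_cons_self]
      rfl
  rw [eqA, eqB, hidx]
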